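-- pv_equiv track=rewrite | github.com/steciuk/MED-dEclat-1 | declat.py | get_dif_sets_map
-- ===== SOURCE A (Python) =====
-- def get_dif_sets_map(
--     data: dict[int, list[int]], all_tokens_ids: set[int]
-- ) -> dict[int, set[int]]:
--     dif_map: dict[int, set[int]] = {token_id: set() for token_id in all_tokens_ids}
--     for transaction_id, tokens_ids in data.items():
--         non_existing_tokens_ids: set[int] = all_tokens_ids - set(tokens_ids)
--         for token_id in non_existing_tokens_ids:
--             dif_map[token_id].add(transaction_id)
--
--     return dif_map
-- ===== SOURCE B (Python) =====
-- def get_dif_sets_map(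
--     data: dict[int, list[int]], all_tokens_ids: set[int]
-- ) -> dict[int, set[int]]:
--     # Per-token scan: a token's diffset is simply the transactions whose
--     # token list does not contain it; no incremental dict mutation needed.
--     return {
--         token_id: {
--             transaction_id
--             for transaction_id, tokens_ids in data.items()
--             if token_id not in tokens_ids
--         }
--         for token_id in all_tokens_ids
--     }
-- ===== Notes on version B (the rewrite author's own statement) =====
-- stated objective: simpler
-- what changed: A initialises an empty-set dict and mutates it per transaction via the complement set all_tokens_ids - set(tokens); B is a pure double comprehension transposing the loops: for each token it directly collects the transaction ids whose token list does not contain it, with no dict mutation or set differences at all.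
import Mathlib
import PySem

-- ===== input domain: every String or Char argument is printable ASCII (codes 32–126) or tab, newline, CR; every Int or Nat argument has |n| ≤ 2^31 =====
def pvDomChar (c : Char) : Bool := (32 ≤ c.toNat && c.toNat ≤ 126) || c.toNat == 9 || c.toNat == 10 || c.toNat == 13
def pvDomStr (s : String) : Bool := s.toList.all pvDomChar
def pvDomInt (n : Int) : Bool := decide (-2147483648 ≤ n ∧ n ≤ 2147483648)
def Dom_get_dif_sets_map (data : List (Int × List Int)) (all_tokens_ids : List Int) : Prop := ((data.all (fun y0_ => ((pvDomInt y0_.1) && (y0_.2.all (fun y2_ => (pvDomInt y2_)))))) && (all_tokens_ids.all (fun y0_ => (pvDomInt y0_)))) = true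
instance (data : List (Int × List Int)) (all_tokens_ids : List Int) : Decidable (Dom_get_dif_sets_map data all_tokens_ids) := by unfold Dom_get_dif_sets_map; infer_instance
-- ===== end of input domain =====

-- ===== PORT A =====
-- B replaces A's per-transaction dict mutation by a pure per-token double comprehension
-- (objective: simpler); not claimed faster.
def get_dif_sets_map (data : List (Int × List Int)) (all_tokens_ids : List Int) : List (Int × List Int) :=
  let dif_map : PySem.Dict Int (List Int) :=
    all_tokens_ids.foldl (fun d token_id => d.insert token_id PySem.Set.empty) PySem.Dict.empty
  let dif_map :=
    data.foldl (fun d p =>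
      let non_existing := PySem.Set.diff (PySem.Set.ofList all_tokens_ids) (PySem.Set.ofList p.2)
      non_existing.foldl (fun d token_id => d.modify token_id [] (fun s => PySem.Set.add s p.1)) d)
      dif_map
  dif_map.items

-- ===== PORT B =====
-- Source B's dict comprehension runs over the distinct elements of the set all_tokens_ids,
-- so its items are a map over that list; the inner set comprehension is a Set.add fold over data.
def get_dif_sets_map_alt (data : List (Int × List Int)) (all_tokens_ids : List Int) : List (Int × List Int) :=
  all_tokens_ids.map (fun token_id =>
    (token_id,
      data.foldl (fun s p => if token_id ∈ p.2 then s else PySem.Set.add s p.1) []))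

-- ===== PRECONDITION & SPEC =====
-- In Python, data is a dict and all_tokens_ids a set: their List encodings with duplicate
-- keys / duplicate elements represent no Python input, so Pre_ requires both to be duplicate-free.
def Pre_get_dif_sets_map (data : List (Int × List Int)) (all_tokens_ids : List Int) : Prop :=
  (data.map Prod.fst).Nodup ∧ all_tokens_ids.Nodup
instance (data : List (Int × List Int)) (all_tokens_ids : List Int) : Decidable (Pre_get_dif_sets_map data all_tokens_ids) := by unfold Pre_get_dif_sets_map; infer_instance
def pvWitness_get_dif_sets_map : (List (Int × List Int)) × List Int := ([(1, [3]), (2, [])], [3, 4])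
def Spec_get_dif_sets_map (data : List (Int × List Int)) (all_tokens_ids : List Int) (out : List (Int × List Int)) : Prop := out = get_dif_sets_map_alt data all_tokens_ids
instance (data : List (Int × List Int)) (all_tokens_ids : List Int) (out : List (Int × List Int)) : Decidable (Spec_get_dif_sets_map data all_tokens_ids out) := by unfold Spec_get_dif_sets_map; infer_instance

-- ===== CLAIM (what is proved, stated in full; the proofs are below) =====
def Claim_equal_get_dif_sets_map : Prop := ∀ (data : List (Int × List Int)) (all_tokens_ids : List Int), Dom_get_dif_sets_map data all_tokens_ids → Pre_get_dif_sets_map data all_tokens_ids → Spec_get_dif_sets_map data all_tokens_ids (get_dif_sets_map data all_tokens_ids)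

-- ===== LEMMAS AND PROOFS =====

theorem update_self (s : List Int) (l : List Int) (h : ∀ x ∈ l, x ∈ s) :
    PySem.Set.update s l = s := by
  rw [PySem.Set.update_eq_append_filter]
  have hnil : List.filter (fun y => !PySem.Set.contains s y) (PySem.Set.ofList l) = [] := by
    rw [List.filter_eq_nil_iff]
    intro a ha
    have hm : a ∈ s := h a ((PySem.Set.mem_ofList l a).1 ha)
    simpa using hm
  rw [hnil, List.append_nil]

theorem init_getD (l : List Int) (k : Int) : ∀ (d : PySem.Dict Int (List Int)),
    (l.foldl (fun d t => d.insert t PySem.Set.empty) d).getD k [] =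
      (if k ∈ l then [] else d.getD k []) := by
  induction l with
  | nil => intro d; simp
  | cons x xs ih =>
    intro d
    simp only [List.foldl_cons, ih, PySem.Dict.getD_insert]
    by_cases hk : k ∈ xs <;> by_cases hx : k = x <;> simp [hk, hx]

theorem modify_loop_getD (tid t : Int) : ∀ (l : List Int) (d : PySem.Dict Int (List Int)),
    (l.foldl (fun d k => d.modify k [] (fun s => PySem.Set.add s tid)) d).getD t [] =
      (if t ∈ l then PySem.Set.add (d.getD t []) tid else d.getD t []) := by
  intro l
  induction l with
  | nil => intro d; simp
  | cons x xs ih =>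
    intro d
    simp only [List.foldl_cons, ih, PySem.Dict.getD_modify]
    by_cases hk : t ∈ xs <;> by_cases hx : t = x <;> simp [hk, hx]

theorem modify_loop_keys (tid : Int) (l : List Int) (d : PySem.Dict Int (List Int)) :
    (l.foldl (fun d k => d.modify k [] (fun s => PySem.Set.add s tid)) d).keys =
      PySem.Set.update d.keys l :=
  PySem.Dict.keys_foldl_modify l [] (fun _ _ s => PySem.Set.add s tid) d

-- keys of A's outer fold stay = ofList toks
theorem A_keys (toks : List Int) : ∀ (data : List (Int × List Int)) (d : PySem.Dict Int (List Int)),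
    d.keys = PySem.Set.ofList toks →
    (data.foldl (fun d p =>
        (PySem.Set.diff (PySem.Set.ofList toks) (PySem.Set.ofList p.2)).foldl
          (fun d token_id => d.modify token_id [] (fun s => PySem.Set.add s p.1)) d) d).keys =
      PySem.Set.ofList toks := by
  intro data
  induction data with
  | nil => intro d h; exact h
  | cons p ps ih =>
    intro d h
    simp only [List.foldl_cons]
    apply ih
    rw [modify_loop_keys, h, update_self]
    intro x hx
    exact ((PySem.Set.mem_diff _ _ x).1 hx).1

-- value at t after A's outer fold, as a pure fold over data
theorem A_getD (toks : List Int) (t : Int) : ∀ (data : List (Int × List Int)) (d : PySem.Dict Int (List Int)),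
    (data.foldl (fun d p =>
        (PySem.Set.diff (PySem.Set.ofList toks) (PySem.Set.ofList p.2)).foldl
          (fun d token_id => d.modify token_id [] (fun s => PySem.Set.add s p.1)) d) d).getD t [] =
      data.foldl (fun s p => if t ∈ toks ∧ t ∉ p.2 then PySem.Set.add s p.1 else s) (d.getD t []) := by
  intro data
  induction data with
  | nil => intro d; rfl
  | cons p ps ih =>
    intro d
    simp only [List.foldl_cons, ih, modify_loop_getD]
    have hm : t ∈ PySem.Set.diff (PySem.Set.ofList toks) (PySem.Set.ofList p.2) ↔ (t ∈ toks ∧ t ∉ p.2) := by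
      rw [PySem.Set.mem_diff]
      simp [PySem.Set.mem_ofList]
    by_cases h : t ∈ toks ∧ t ∉ p.2
    · rw [if_pos (hm.2 h), if_pos h]
    · rw [if_neg (fun hc => h (hm.1 hc)), if_neg h]

-- a dict with duplicate-free keys is its keys paired with its values
theorem items_eq_keys_map (d : PySem.Dict Int (List Int)) (hnd : d.keys.Nodup) :
    d.items = d.keys.map (fun k => (k, d.getD k [])) := by
  have h1 : d.keys.map (fun k => (k, d.getD k [])) =
      d.items.map (fun p => (p.1, d.getD p.1 [])) := by
    simp [PySem.Dict.keys, List.map_map, Function.comp_def]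
  rw [h1]
  nth_rewrite 1 [← List.map_id d.items]
  apply List.map_congr_left
  intro p hp
  have hv := PySem.Dict.getD_of_mem_items d hp hnd []
  simp [hv]

-- ===== VERDICT (by name: the statement is the Claim_ definition above) =====
theorem get_dif_sets_map_spec : Claim_equal_get_dif_sets_map := by
  intro data toks _ hpre
  obtain ⟨hndd, hndt⟩ := hpre
  unfold Spec_get_dif_sets_map get_dif_sets_map get_dif_sets_map_alt
  dsimp only
  have hkeys_init : (toks.foldl (fun d t => d.insert t PySem.Set.empty)
      (PySem.Dict.empty : PySem.Dict Int (List Int))).keys = PySem.Set.ofList toks := by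
    rw [PySem.Dict.keys_foldl_insert toks (fun _ _ => PySem.Set.empty) PySem.Dict.empty]
    rw [PySem.Dict.keys_empty, PySem.Set.update_nil_left]
  have hkeysA := A_keys toks data _ hkeys_init
  have hndA : (data.foldl (fun d p =>
        (PySem.Set.diff (PySem.Set.ofList toks) (PySem.Set.ofList p.2)).foldl
          (fun d token_id => d.modify token_id [] (fun s => PySem.Set.add s p.1)) d)
      (toks.foldl (fun d t => d.insert t PySem.Set.empty) PySem.Dict.empty)).keys.Nodup := by
    rw [hkeysA]; exact PySem.Set.nodup_ofList toks
  set dA := data.foldl (fun d p =>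
        (PySem.Set.diff (PySem.Set.ofList toks) (PySem.Set.ofList p.2)).foldl
          (fun d token_id => d.modify token_id [] (fun s => PySem.Set.add s p.1)) d)
      (toks.foldl (fun d t => d.insert t PySem.Set.empty) PySem.Dict.empty) with hdA
  rw [items_eq_keys_map _ hndA, hkeysA, PySem.Set.ofList_eq_self_of_nodup _ hndt]
  apply List.map_congr_left
  intro k hk
  have hval : dA.getD k [] =
      data.foldl (fun s p => if k ∈ p.2 then s else PySem.Set.add s p.1) [] := by
    rw [hdA, A_getD toks k data _, init_getD toks k PySem.Dict.empty, if_pos hk]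
    apply PySem.List.foldl_congr_mem
    intro acc x _
    by_cases h : k ∈ x.2 <;> simp [h, hk]
  rw [hval]
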